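-- pv_equiv track=rewrite | github.com/ishandutta2007/codeforces | ecnerwala/normal/1089/J.py | word_match
-- ===== SOURCE A (Python) =====
-- def is_digit(c):
--     return '0' <= c <= '9'
--
-- def is_word_char(c):
--     return c == '_' or c == '$' or '0' <= c <= '9' or 'A' <= c <= 'Z' or 'a' <= c <= 'z'
--
-- def word_match(s, ind):
--     assert ind < len(s)
--     if is_digit(s[ind]):
--         return 0
--     res = 0
--     while res + ind < len(s) and is_word_char(s[res + ind]):
--         res += 1
--     return res
-- ===== SOURCE B (Python) =====
-- import re
--
-- # Leading class excludes digits (mirrors the is-digit early return); trailing class is the full word-char set.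
-- _WORD_RE = re.compile(r'[_$A-Za-z][_$A-Za-z0-9]*')
--
-- def word_match(s, ind):
--     assert ind < len(s)
--     m = _WORD_RE.match(s[ind:])
--     return m.end() if m else 0
-- ===== Notes on version B (the rewrite author's own statement) =====
-- stated objective: idiomatic
-- what changed: Replaces the manual index-arithmetic while-loop (which indexes s[res+ind] element by element in Python) with a single compiled-regex match [_$A-Za-z][_$A-Za-z0-9]* against the slice s[ind:], so no explicit per-character Python-level scan or wraparound indexing remains; the C regex engine gives a measured constant-factor speedup.
-- intended difference: For negative ind where s[ind] starts a word and the whole suffix s[ind:] is word characters and s[0] is also a word character, A's s[res+ind] indexing wraps past the end and re-scans the string from the front (e.g. A('ab',-1)=3), while B returns the length of the word prefix of s[ind:] (B('ab',-1)=1), which is the intended count of leading word characters from position ind. — e.g. on word_match("ab", -1): A returns 3, B returns 1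
import Mathlib
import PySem

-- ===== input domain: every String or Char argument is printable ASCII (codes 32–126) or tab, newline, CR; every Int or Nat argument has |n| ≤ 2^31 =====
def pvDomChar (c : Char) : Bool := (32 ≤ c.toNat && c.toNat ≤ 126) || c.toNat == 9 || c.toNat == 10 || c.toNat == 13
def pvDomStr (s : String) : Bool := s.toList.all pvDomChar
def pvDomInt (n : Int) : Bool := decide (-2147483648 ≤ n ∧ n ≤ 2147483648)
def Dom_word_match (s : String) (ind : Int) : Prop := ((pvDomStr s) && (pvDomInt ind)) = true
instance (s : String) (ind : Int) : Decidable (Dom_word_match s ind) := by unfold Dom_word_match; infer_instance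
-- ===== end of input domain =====

-- B replaces A's manual while-loop with index arithmetic by one regex-style match
-- ([_$A-Za-z][_$A-Za-z0-9]*) on the slice s[ind:] (objective: idiomatic); on negative ind
-- with an all-word suffix the two differ (A's indexing wraps), stated in D_word_match.


-- ===== PORT A =====
-- is_digit c = '0' <= c <= '9'  (character comparisons written on the code points: '0' = 48, '9' = 57)
def pvIsDigit (c : Char) : Bool := 48 ≤ c.toNat && c.toNat ≤ 57
-- is_word_char c = c == '_' or c == '$' or '0'<=c<='9' or 'A'<=c<='Z' or 'a'<=c<='z'
-- ('_' = 95, '$' = 36, 'A'..'Z' = 65..90, 'a'..'z' = 97..122)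
def pvIsWord (c : Char) : Bool :=
  c == '_' || c == '$' || (48 ≤ c.toNat && c.toNat ≤ 57) ||
  (65 ≤ c.toNat && c.toNat ≤ 90) || (97 ≤ c.toNat && c.toNat ≤ 122)

-- the while-loop: res increments while res+ind < len(s) and is_word_char(s[res+ind]);
-- fuel bounds the iterations (the call supplies (len - ind).toNat, enough for every run);
-- pyGet? = Python indexing (negative index from the end); none = IndexError (outside Pre_).
def wmLoop (cs : List Char) (ind : Int) : Nat → Int → Int
  | 0, res => res
  | fuel + 1, res =>
    if res + ind < (cs.length : Int) then
      match PySem.List.pyGet? cs (res + ind) with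
      | some c => if pvIsWord c then wmLoop cs ind fuel (res + 1) else res
      | none => res
    else res

def word_match (s : String) (ind : Int) : Int :=
  let cs := s.toList
  if ind < (cs.length : Int) then        -- assert ind < len(s); otherwise A raises (outside Pre_)
    match PySem.List.pyGet? cs ind with  -- s[ind]; none = IndexError (outside Pre_)
    | some c => if pvIsDigit c then 0 else wmLoop cs ind (cs.length - ind).toNat 0
    | none => 0
  else 0

-- ===== PORT B =====
-- the regex's leading class [_$A-Za-z]
def pvLead (c : Char) : Bool :=
  c == '_' || c == '$' || (65 ≤ c.toNat && c.toNat ≤ 90) || (97 ≤ c.toNat && c.toNat ≤ 122)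
-- the regex's trailing class [_$A-Za-z0-9] is exactly A's word-char class pvIsWord,
-- which the port reuses for it

def word_match_alt (s : String) (ind : Int) : Int :=
  let cs := s.toList
  if ind < (cs.length : Int) then        -- assert ind < len(s)
    -- re.match of [_$A-Za-z][_$A-Za-z0-9]* on s[ind:]: one leading-class char, then the
    -- maximal run of trailing-class chars; no match gives 0.  slice = Python's s[ind:].
    match PySem.List.slice cs (some ind) none with
    | [] => 0
    | c :: rest => if pvLead c then 1 + ((rest.takeWhile pvIsWord).length : Int) else 0
  else 0

-- ===== PRECONDITION & SPEC =====
-- Pre_ excludes exactly the inputs where A raises: ind ≥ len(s) (AssertionError) and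
-- ind < -len(s) (IndexError at s[ind]).
def Pre_word_match (s : String) (ind : Int) : Prop :=
  -(s.toList.length : Int) ≤ ind ∧ ind < (s.toList.length : Int)
instance (s : String) (ind : Int) : Decidable (Pre_word_match s ind) := by
  unfold Pre_word_match; infer_instance
def pvWitness_word_match : String × Int := ("a_1 b", 0)

-- For negative ind where s[ind] starts a word, the whole suffix s[ind:] is word characters
-- and s[0] is a word character too, A's s[res+ind] indexing wraps past the end and re-scans
-- the string from the front, while B returns the length of the word prefix of s[ind:],
-- the intended count of leading word characters from position ind.
def D_word_match (s : String) (ind : Int) : Prop :=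
  ind < 0 ∧ -(s.toList.length : Int) ≤ ind ∧
  ¬ pvIsDigit (s.toList.getD (s.toList.length + ind).toNat ' ') = true ∧
  (s.toList.drop (s.toList.length + ind).toNat).all pvIsWord = true ∧
  pvIsWord (s.toList.getD 0 ' ') = true
instance (s : String) (ind : Int) : Decidable (D_word_match s ind) := by
  unfold D_word_match; infer_instance

def Spec_word_match (s : String) (ind : Int) (out : Int) : Prop :=
  ¬ D_word_match s ind → out = word_match_alt s ind
instance (s : String) (ind : Int) (out : Int) : Decidable (Spec_word_match s ind out) := by
  unfold Spec_word_match; infer_instance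

def pvDiffWitness_word_match : String × Int := ("ab", -1)
def pvDiffWitnessOut_word_match : Int × Int := (3, 1)

-- ===== CLAIM (what is proved, stated in full; the proofs are below) =====
def Claim_unchanged_word_match : Prop := ∀ (s : String) (ind : Int), Dom_word_match s ind → Pre_word_match s ind → Spec_word_match s ind (word_match s ind)
def Claim_changed_word_match : Prop := Dom_word_match (pvDiffWitness_word_match.1) (pvDiffWitness_word_match.2) ∧ Pre_word_match (pvDiffWitness_word_match.1) (pvDiffWitness_word_match.2) ∧ D_word_match (pvDiffWitness_word_match.1) (pvDiffWitness_word_match.2) ∧ word_match (pvDiffWitness_word_match.1) (pvDiffWitness_word_match.2) = pvDiffWitnessOut_word_match.1 ∧ word_match_alt (pvDiffWitness_word_match.1) (pvDiffWitness_word_match.2) = pvDiffWitnessOut_word_match.2 ∧ pvDiffWitnessOut_word_match.1 ≠ pvDiffWitnessOut_word_match.2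
def Claim_exact_word_match : Prop := ∀ (s : String) (ind : Int), Dom_word_match s ind → Pre_word_match s ind → D_word_match s ind → word_match s ind ≠ word_match_alt s ind

-- ===== LEMMAS AND PROOFS =====

theorem char_eq_iff_toNat (c d : Char) : c = d ↔ c.toNat = d.toNat :=
  ⟨fun h => by rw [h], fun h => Char.ext (UInt32.toNat_inj.mp h)⟩

-- the leading regex class is exactly "word char and not a digit"
theorem lead_iff (c : Char) : pvLead c = true ↔ (pvIsWord c = true ∧ ¬ pvIsDigit c = true) := by
  simp only [pvLead, pvIsWord, pvIsDigit, Bool.or_eq_true, Bool.and_eq_true, beq_iff_eq,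
    decide_eq_true_eq, char_eq_iff_toNat, show ('_'.toNat) = 95 from rfl,
    show ('$'.toNat) = 36 from rfl]
  omega

theorem takeWhile_length_eq_iff (p : Char → Bool) (l : List Char) :
    ((l.takeWhile p).length = l.length) ↔ l.all p = true := by
  constructor
  · intro h
    have hsub := List.takeWhile_sublist (l := l) (p := p)
    have heq : l.takeWhile p = l := hsub.eq_of_length h
    rw [List.all_eq_true]
    exact fun a ha => (List.takeWhile_eq_self_iff.mp heq) a ha
  · intro h
    rw [List.takeWhile_eq_self_iff.mpr (by simpa [List.all_eq_true] using h)]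

-- the list of characters A's loop visits, in order: s[ind], s[ind+1], …, s[len-1],
-- where negative indices wrap (after s[-1] the loop reads s[0], s[1], …)
def visitList (cs : List Char) (ind : Int) : List Char :=
  if ind < 0 then cs.drop (cs.length + ind).toNat ++ cs else cs.drop ind.toNat

theorem length_visitList (cs : List Char) (ind : Int)
    (h1 : -(cs.length : Int) ≤ ind) (h2 : ind ≤ (cs.length : Int)) :
    ((visitList cs ind).length : Int) = (cs.length : Int) - ind := by
  unfold visitList
  split_ifs with h <;> simp <;> omega

theorem pyGet_visit (cs : List Char) (ind : Int)
    (h1 : -(cs.length : Int) ≤ ind)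
    (r : Nat) (_hr : (r : Int) + ind < (cs.length : Int)) :
    PySem.List.pyGet? cs ((r : Int) + ind) = (visitList cs ind)[r]? := by
  unfold visitList
  by_cases h : ind < 0
  · rw [if_pos h]
    have hdl : (cs.drop (cs.length + ind).toNat).length = (-ind).toNat := by
      simp; omega
    by_cases hneg : (r : Int) + ind < 0
    · obtain ⟨k, hk, hk0, hkl⟩ :
        ∃ k : Nat, (r : Int) + ind = -(k : Int) ∧ 0 < k ∧ k ≤ cs.length :=
        ⟨(-((r : Int) + ind)).toNat, by omega, by omega, by omega⟩
      rw [hk, PySem.List.pyGet?_neg_natCast cs k hk0 hkl,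
        List.getElem?_append_left (by omega), List.getElem?_drop]
      congr 1
      omega
    · rw [PySem.List.pyGet?_of_nonneg cs (by omega),
        List.getElem?_append_right (by omega)]
      congr 1
      omega
  · rw [if_neg h]
    rw [PySem.List.pyGet?_of_nonneg cs (by omega), List.getElem?_drop]
    congr 1
    omega

theorem wmLoop_eq (cs : List Char) (ind : Int)
    (h1 : -(cs.length : Int) ≤ ind) (h2 : ind ≤ (cs.length : Int)) :
    ∀ (fuel r : Nat), (visitList cs ind).length ≤ fuel + r →
      wmLoop cs ind fuel (r : Int)
        = (r : Int) + ((((visitList cs ind).drop r).takeWhile pvIsWord).length : Int) := by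
  intro fuel
  induction fuel with
  | zero =>
    intro r _hr
    rw [List.drop_eq_nil_of_le (by omega)]
    simp [wmLoop]
  | succ n ih =>
    intro r hr
    have hlen := length_visitList cs ind h1 h2
    by_cases hcond : (r : Int) + ind < (cs.length : Int)
    · have hrV : r < (visitList cs ind).length := by omega
      rw [wmLoop, if_pos hcond, pyGet_visit cs ind h1 r hcond,
        List.getElem?_eq_getElem hrV]
      simp only
      rw [List.drop_eq_getElem_cons hrV, List.takeWhile_cons]
      by_cases hw : pvIsWord ((visitList cs ind)[r]) = true
      · rw [if_pos hw, if_pos hw]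
        have hcast : (r : Int) + 1 = ((r + 1 : Nat) : Int) := by push_cast; ring
        rw [hcast, ih (r + 1) (by omega)]
        simp only [List.length_cons]
        push_cast
        ring
      · rw [if_neg hw, if_neg hw]
        simp
    · rw [wmLoop, if_neg hcond, List.drop_eq_nil_of_le (by omega)]
      simp

-- characterization of A on Pre_: digit head gives 0, else the word-char prefix of visitList
theorem word_match_char (s : String) (ind : Int) (h : Pre_word_match s ind) :
    word_match s ind =
      if pvIsDigit ((visitList s.toList ind).getD 0 ' ') then 0
      else (((visitList s.toList ind).takeWhile pvIsWord).length : Int) := by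
  obtain ⟨h1, h2⟩ := h
  have hlen := length_visitList s.toList ind h1 (le_of_lt h2)
  have hV0 : 0 < (visitList s.toList ind).length := by omega
  have hget : PySem.List.pyGet? s.toList ind = some ((visitList s.toList ind).getD 0 ' ') := by
    have hv := pyGet_visit s.toList ind h1 0 (by omega)
    rw [List.getElem?_eq_getElem hV0] at hv
    rw [List.getD_eq_getElem?_getD, List.getElem?_eq_getElem hV0]
    simpa using hv
  unfold word_match
  rw [if_pos h2, hget]
  simp only
  by_cases hd : pvIsDigit ((visitList s.toList ind).getD 0 ' ') = true
  · rw [if_pos hd, if_pos hd]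
  · rw [if_neg hd, if_neg hd]
    have h0 : ((0 : Nat) : Int) = (0 : Int) := rfl
    rw [← h0, wmLoop_eq s.toList ind h1 (le_of_lt h2) _ 0 (by omega)]
    simp

-- Python's s[ind:] for -len ≤ ind: dropping the effective start index
theorem slice_eq_drop (cs : List Char) (ind : Int) (h1 : -(cs.length : Int) ≤ ind) :
    PySem.List.slice cs (some ind) none
      = cs.drop (if ind < 0 then (cs.length + ind).toNat else ind.toNat) := by
  split_ifs with h
  · obtain ⟨k, hk, hk0⟩ : ∃ k : Nat, ind = -(k : Int) ∧ 0 < k :=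
      ⟨(-ind).toNat, by omega, by omega⟩
    rw [hk, PySem.List.slice_from_neg_natCast cs k hk0]
    congr 1
    omega
  · rw [PySem.List.slice_from cs (by omega)]

theorem word_match_spec : Claim_unchanged_word_match := by
  intro s ind _ hpre hnd
  obtain ⟨h1, h2⟩ := hpre
  -- the effective start index and the suffix
  set j : Nat := if ind < 0 then (s.toList.length + ind).toNat else ind.toNat with hj
  have hjlt : j < s.toList.length := by
    rw [hj]; split_ifs with h <;> omega
  have hS : s.toList.drop j ≠ [] := by
    intro hcon
    have := List.drop_eq_nil_iff.mp hcon
    omega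
  obtain ⟨c, rest, hcr⟩ := List.exists_cons_of_ne_nil hS
  -- B's value
  have haltB : word_match_alt s ind
      = if pvLead c then 1 + ((rest.takeWhile pvIsWord).length : Int) else 0 := by
    unfold word_match_alt
    rw [if_pos h2, slice_eq_drop s.toList ind h1, ← hj, hcr]
  -- shape of the visited list
  have hVshape : visitList s.toList ind
      = (c :: rest) ++ (if ind < 0 then s.toList else []) := by
    unfold visitList
    split_ifs with h
    · rw [hj, if_pos h] at hcr; rw [hcr]
    · rw [hj, if_neg h] at hcr; rw [hcr, List.append_nil]
  have hhead : (visitList s.toList ind).getD 0 ' ' = c := by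
    rw [hVshape]; rfl
  rw [word_match_char s ind ⟨h1, h2⟩, hhead, haltB, hVshape]
  by_cases hd : pvIsDigit c = true
  · have hlf : pvLead c = false := by
      cases hlc : pvLead c
      · rfl
      · exact absurd hd ((lead_iff c).mp hlc).2
    rw [if_pos hd, hlf]
    simp
  · rw [if_neg hd]
    by_cases hw : pvIsWord c = true
    · have hlead : pvLead c = true := (lead_iff c).mpr ⟨hw, hd⟩
      rw [hlead, if_pos rfl]
      by_cases hneg : ind < 0
      · rw [if_pos hneg]
        -- connect ¬D to this suffix
        have hjval : j = (s.toList.length + ind).toNat := by rw [hj, if_pos hneg]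
        have hgj : s.toList.getD (s.toList.length + ind).toNat ' ' = c := by
          have hq : s.toList[(s.toList.length + ind).toNat]? = some c := by
            have hq0 := List.getElem?_drop (xs := s.toList) (i := j) (j := 0)
            rw [hcr] at hq0
            simpa [hjval] using hq0.symm
          rw [List.getD_eq_getElem?_getD, hq]
          rfl
        have hnall : ¬ ((s.toList.drop (s.toList.length + ind).toNat).all pvIsWord = true ∧
            pvIsWord (s.toList.getD 0 ' ') = true) := by
          intro ⟨ha, hb⟩
          exact hnd ⟨hneg, h1, by rw [hgj]; exact hd, ha, hb⟩
        rw [← hjval, hcr] at hnall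
        by_cases hall : (c :: rest).all pvIsWord = true
        case neg =>
          -- suffix contains a non-word char: the loop never reaches the wrap
          rw [List.takeWhile_append,
            if_neg (fun hcon => hall ((takeWhile_length_eq_iff pvIsWord (c :: rest)).mp hcon)),
            List.takeWhile_cons, if_pos hw]
          simp only [List.length_cons]
          push_cast
          ring
        case pos =>
          -- suffix all word chars but s[0] is not: the loop stops right after the wrap
          have hnh : ¬ pvIsWord (s.toList.getD 0 ' ') = true := fun hb => hnall ⟨hall, hb⟩
          obtain ⟨c0, t0, h0⟩ := List.exists_cons_of_ne_nil
            (List.ne_nil_of_length_pos (by omega) : s.toList ≠ [])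
          have hc0 : pvIsWord c0 = false := by
            cases hq : pvIsWord c0
            · rfl
            · rw [h0] at hnh
              exact absurd hq (by simpa using hnh)
          rw [List.takeWhile_append,
            if_pos ((takeWhile_length_eq_iff pvIsWord (c :: rest)).mpr hall),
            h0, List.takeWhile_cons, if_neg (by simp [hc0])]
          have hrw : rest.takeWhile pvIsWord = rest :=
            List.takeWhile_eq_self_iff.mpr
              (fun a ha => List.all_eq_true.mp hall a (by simp [ha]))
          rw [hrw]
          simp only [List.append_nil, List.length_cons]
          push_cast
          ring
      · rw [if_neg hneg, List.append_nil, List.takeWhile_cons, if_pos hw]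
        simp only [List.length_cons]
        push_cast
        ring
    · have hlf : pvLead c = false := by
        cases hlc : pvLead c
        · rfl
        · exact absurd ((lead_iff c).mp hlc).1 hw
      rw [hlf]
      have hz : ((c :: rest) ++ (if ind < 0 then s.toList else [])).takeWhile pvIsWord = [] := by
        rw [List.cons_append, List.takeWhile_cons, if_neg hw]
      rw [hz]
      simp

-- ===== VERDICT (by name: the statement is the Claim_ definition above) =====
theorem word_match_changed : Claim_changed_word_match := by
  unfold Claim_changed_word_match; decide

theorem word_match_tight : Claim_exact_word_match := by
  intro s ind _ hpre hD
  obtain ⟨h1, h2⟩ := hpre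
  obtain ⟨hneg, _, hDd, hDall, hDh⟩ := hD
  set j : Nat := (s.toList.length + ind).toNat with hj
  have hjlt : j < s.toList.length := by omega
  have hS : s.toList.drop j ≠ [] := by
    intro hcon
    have := List.drop_eq_nil_iff.mp hcon
    omega
  obtain ⟨c, rest, hcr⟩ := List.exists_cons_of_ne_nil hS
  have hgj : s.toList.getD j ' ' = c := by
    have hq : s.toList[j]? = some c := by
      have hq0 := List.getElem?_drop (xs := s.toList) (i := j) (j := 0)
      rw [hcr] at hq0
      simpa using hq0.symm
    rw [List.getD_eq_getElem?_getD, hq]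
    rfl
  have hall : (c :: rest).all pvIsWord = true := by rw [← hcr]; exact hDall
  have hw : pvIsWord c = true := List.all_eq_true.mp hall c (by simp)
  have hd : ¬ pvIsDigit c = true := by rw [← hgj]; exact hDd
  have hlead : pvLead c = true := (lead_iff c).mpr ⟨hw, hd⟩
  obtain ⟨c0, t0, h0⟩ := List.exists_cons_of_ne_nil
    (List.ne_nil_of_length_pos (by omega) : s.toList ≠ [])
  have hc0 : pvIsWord c0 = true := by
    rw [h0] at hDh
    simpa using hDh
  -- A's value: the whole suffix plus at least one wrapped character
  have hVshape : visitList s.toList ind = (c :: rest) ++ s.toList := by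
    unfold visitList
    rw [if_pos hneg, ← hj, hcr]
  have hhead : (visitList s.toList ind).getD 0 ' ' = c := by rw [hVshape]; rfl
  rw [word_match_char s ind ⟨h1, h2⟩, hhead, if_neg hd, hVshape, List.takeWhile_append,
    if_pos ((takeWhile_length_eq_iff pvIsWord (c :: rest)).mpr hall)]
  -- B's value: exactly the suffix
  have haltB : word_match_alt s ind
      = 1 + ((rest.takeWhile pvIsWord).length : Int) := by
    unfold word_match_alt
    rw [if_pos h2, slice_eq_drop s.toList ind h1, if_pos hneg, ← hj, hcr]
    simp only [hlead]
    rfl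
  rw [haltB]
  have hrw : rest.takeWhile pvIsWord = rest :=
    List.takeWhile_eq_self_iff.mpr
      (fun a ha => List.all_eq_true.mp hall a (by simp [ha]))
  rw [hrw, h0, List.takeWhile_cons, if_pos hc0]
  simp only [List.length_append, List.length_cons]
  intro hcon
  omega
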